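-- pv_equiv track=rewrite | github.com/Theory903/open-ippoc | infra/src/cortex/gateway/proprioception_scanner.py | _classify_skill
-- ===== SOURCE A (Python) =====
-- from typing import Dict, List, Any, Optional
--
-- def _classify_skill(name: str, metadata: Dict, description: str) -> str:
--     """Classify skill into categories for energy cost calculation"""
--     name_lower = name.lower()
--     desc_lower = description.lower()
--
--     # High-level categorization
--     if any(keyword in name_lower for keyword in ['coding', 'code', 'program', 'dev']):
--         return "development"
--     elif any(keyword in name_lower for keyword in ['github', 'git', 'repo']):
--         return "version_control"
--     elif any(keyword in name_lower for keyword in ['browser', 'web', 'scrape']):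
--         return "web_browsing"
--     elif any(keyword in name_lower for keyword in ['shell', 'cli', 'terminal']):
--         return "system_execution"
--     elif any(keyword in name_lower for keyword in ['chat', 'discord', 'slack', 'telegram']):
--         return "communication"
--     elif any(keyword in name_lower for keyword in ['file', 'fs', 'filesystem']):
--         return "file_operations"
--     elif any(keyword in name_lower for keyword in ['search', 'find', 'lookup']):
--         return "information_retrieval"
--     else:
--         return "general_tool"
-- ===== SOURCE B (Python) =====
-- def _classify_skill(name: str, metadata, description: str) -> str:
--     """Classify skill: map every keyword to its category, collect ALL matching
--     categories in one pass, then return the highest-priority one."""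
--     name_lower = name.lower()
--     desc_lower = description.lower()
--
--     keyword_to_category = {
--         'coding': 'development', 'code': 'development',
--         'program': 'development', 'dev': 'development',
--         'github': 'version_control', 'git': 'version_control', 'repo': 'version_control',
--         'browser': 'web_browsing', 'web': 'web_browsing', 'scrape': 'web_browsing',
--         'shell': 'system_execution', 'cli': 'system_execution', 'terminal': 'system_execution',
--         'chat': 'communication', 'discord': 'communication',
--         'slack': 'communication', 'telegram': 'communication',
--         'file': 'file_operations', 'fs': 'file_operations', 'filesystem': 'file_operations',
--         'search': 'information_retrieval', 'find': 'information_retrieval',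
--         'lookup': 'information_retrieval',
--     }
--     matched = {cat for kw, cat in keyword_to_category.items() if kw in name_lower}
--     for category in ('development', 'version_control', 'web_browsing',
--                      'system_execution', 'communication', 'file_operations',
--                      'information_retrieval'):
--         if category in matched:
--             return category
--     return 'general_tool'
-- ===== Notes on version B (the rewrite author's own statement) =====
-- stated objective: alternative
-- what changed: Instead of A's short-circuiting if/elif chain, B inverts the data into a keyword-to-category map, collects the set of ALL categories whose keyword occurs in the name in one pass, and then returns the first category of a priority order that is in that set.
import Mathlib
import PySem

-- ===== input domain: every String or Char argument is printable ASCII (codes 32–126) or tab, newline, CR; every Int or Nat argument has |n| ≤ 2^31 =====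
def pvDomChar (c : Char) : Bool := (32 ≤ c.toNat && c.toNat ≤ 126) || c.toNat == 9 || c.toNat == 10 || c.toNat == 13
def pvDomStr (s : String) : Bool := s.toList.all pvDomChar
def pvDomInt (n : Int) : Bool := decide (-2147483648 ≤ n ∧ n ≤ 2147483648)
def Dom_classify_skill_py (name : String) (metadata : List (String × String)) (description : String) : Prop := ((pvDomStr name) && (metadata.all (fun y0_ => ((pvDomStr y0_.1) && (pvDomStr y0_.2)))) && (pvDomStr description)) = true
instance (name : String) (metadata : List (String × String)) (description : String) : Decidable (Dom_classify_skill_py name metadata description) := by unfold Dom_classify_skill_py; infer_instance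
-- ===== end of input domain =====

-- B inverts A's branch data into a keyword→category map, collects the set of ALL
-- matching categories in one pass, then returns the first of a priority order
-- that matched (objective: alternative decomposition, same cost).

-- ===== PORT A =====
def classify_skill_py (name : String) (metadata : List (String × String)) (description : String) : String :=
  let name_lower := PySem.Str.lower name
  let _desc_lower := PySem.Str.lower description
  if ["coding", "code", "program", "dev"].any (fun k => PySem.Str.isIn k name_lower) then
    "development"
  else if ["github", "git", "repo"].any (fun k => PySem.Str.isIn k name_lower) then
    "version_control"
  else if ["browser", "web", "scrape"].any (fun k => PySem.Str.isIn k name_lower) then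
    "web_browsing"
  else if ["shell", "cli", "terminal"].any (fun k => PySem.Str.isIn k name_lower) then
    "system_execution"
  else if ["chat", "discord", "slack", "telegram"].any (fun k => PySem.Str.isIn k name_lower) then
    "communication"
  else if ["file", "fs", "filesystem"].any (fun k => PySem.Str.isIn k name_lower) then
    "file_operations"
  else if ["search", "find", "lookup"].any (fun k => PySem.Str.isIn k name_lower) then
    "information_retrieval"
  else
    "general_tool"

-- ===== PORT B =====
-- keyword → category map (a Python dict literal with distinct keys; iterated as items)
def pvKwCat : List (String × String) :=
  [ ("coding", "development"), ("code", "development"),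
    ("program", "development"), ("dev", "development"),
    ("github", "version_control"), ("git", "version_control"), ("repo", "version_control"),
    ("browser", "web_browsing"), ("web", "web_browsing"), ("scrape", "web_browsing"),
    ("shell", "system_execution"), ("cli", "system_execution"), ("terminal", "system_execution"),
    ("chat", "communication"), ("discord", "communication"),
    ("slack", "communication"), ("telegram", "communication"),
    ("file", "file_operations"), ("fs", "file_operations"), ("filesystem", "file_operations"),
    ("search", "information_retrieval"), ("find", "information_retrieval"),
    ("lookup", "information_retrieval") ]

def pvPriority : List String :=
  [ "development", "version_control", "web_browsing", "system_execution",
    "communication", "file_operations", "information_retrieval" ]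

def classify_skill_py_alt (name : String) (metadata : List (String × String)) (description : String) : String :=
  let name_lower := PySem.Str.lower name
  let _desc_lower := PySem.Str.lower description
  -- matched = {cat for kw, cat in keyword_to_category.items() if kw in name_lower}
  let matched : PySem.Set String :=
    PySem.Set.ofList ((pvKwCat.filter (fun p => PySem.Str.isIn p.1 name_lower)).map Prod.snd)
  -- for category in priority: if category in matched: return category
  match pvPriority.find? (fun c => PySem.Set.contains matched c) with
  | some c => c
  | none => "general_tool"

-- ===== PRECONDITION & SPEC =====
def Spec_classify_skill_py (name : String) (metadata : List (String × String)) (description : String) (out : String) : Prop := out = classify_skill_py_alt name metadata description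
instance (name : String) (metadata : List (String × String)) (description : String) (out : String) : Decidable (Spec_classify_skill_py name metadata description out) := by unfold Spec_classify_skill_py; infer_instance

-- ===== CLAIM =====
def Claim_equal_classify_skill_py : Prop := ∀ (name : String) (metadata : List (String × String)) (description : String), Dom_classify_skill_py name metadata description → Spec_classify_skill_py name metadata description (classify_skill_py name metadata description)

-- ===== LEMMAS AND PROOFS =====

-- membership in B's matched set, characterised as a boolean scan of the pairs
theorem contains_ofList_map_filter {α β : Type} [BEq β] [LawfulBEq β]
    (l : List (α × β)) (f : α × β → Bool) (c : β) :
    PySem.Set.contains (PySem.Set.ofList ((l.filter f).map Prod.snd)) c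
      = l.any (fun p => f p && (p.2 == c)) := by
  rw [Bool.eq_iff_iff]
  simp only [PySem.Set.contains_iff, PySem.Set.mem_ofList, List.mem_map, List.mem_filter,
    List.any_eq_true, Bool.and_eq_true, beq_iff_eq]
  constructor
  · rintro ⟨p, ⟨hm, hf⟩, rfl⟩; exact ⟨p, hm, hf, rfl⟩
  · rintro ⟨p, hm, hf, rfl⟩; exact ⟨p, ⟨hm, hf⟩, rfl⟩

-- ===== VERDICT =====
theorem classify_skill_py_spec : Claim_equal_classify_skill_py := by
  intro name metadata description _
  unfold Spec_classify_skill_py classify_skill_py classify_skill_py_alt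
  simp only [contains_ofList_map_filter, pvKwCat, pvPriority,
    List.any_cons, List.any_nil, Bool.or_false]
  simp only [List.find?, String.reduceBEq, beq_self_eq_true, Bool.and_true, Bool.and_false,
    Bool.false_or, Bool.or_false]
  split_ifs
  all_goals try simp only [Bool.not_eq_true] at *
  all_goals simp only [*]
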